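-- pv_equiv track=rewrite | github.com/Cosomazio/FakeNewsDetection | FNDetection/feature_extraction/content_level.py | contains_quotes
-- ===== SOURCE A (Python) =====
-- def contains_quotes(text):
--     #due flagghine per giggino
--     up=False
--     down=False
--     for i in range(len(text)//2):
--         j=len(text)-1-i
--         if "\"" in text[i]: up=True
--         if "\"" in text[j]: down=True
--
--     return up & down
-- ===== SOURCE B (Python) =====
-- def contains_quotes(text):
--     pos = [i for i, c in enumerate(text) if c == '"']
--     if not pos:
--         return False
--     half = len(text) // 2
--     return pos[0] < half and pos[-1] >= len(text) - half
-- ===== Notes on version B (the rewrite author's own statement) =====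
-- stated objective: alternative
-- what changed: Instead of scanning with mirrored indices and two flags, B builds the list of quote positions in one enumerate pass and decides by comparing the first (minimal) and last (maximal) position against the half-length boundaries.
import Mathlib
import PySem

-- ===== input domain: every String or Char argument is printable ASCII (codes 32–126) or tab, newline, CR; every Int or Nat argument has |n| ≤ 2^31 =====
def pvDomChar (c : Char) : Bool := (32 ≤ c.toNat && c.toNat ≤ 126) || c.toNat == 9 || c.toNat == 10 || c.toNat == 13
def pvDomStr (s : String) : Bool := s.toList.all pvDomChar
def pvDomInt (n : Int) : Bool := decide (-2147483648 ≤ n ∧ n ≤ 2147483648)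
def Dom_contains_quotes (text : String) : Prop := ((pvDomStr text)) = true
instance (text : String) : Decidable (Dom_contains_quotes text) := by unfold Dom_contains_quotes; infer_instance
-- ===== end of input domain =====

-- B replaces A's mirrored index loop with two flags by one enumerate pass collecting
-- the quote positions and then comparing the first and last position with the half bounds.

-- ===== PORT A =====
-- A's loop step: the i-th iteration reads text[i] and text[len-1-i] and raises the two flags.
def cqStep (cs : List Char) (n : Int) (st : Bool × Bool) (i : Int) : Bool × Bool :=
  let j : Int := n - 1 - i
  let up := if PySem.Chars.isIn ['"'] [PySem.List.pyGetD cs i ' '] then true else st.1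
  let down := if PySem.Chars.isIn ['"'] [PySem.List.pyGetD cs j ' '] then true else st.2
  (up, down)

def contains_quotes (text : String) : Bool :=
  let cs := text.toList
  let n : Int := PySem.Str.len text
  let st := (PySem.List.pyRange 0 (PySem.Int.floordiv n 2) 1).foldl (cqStep cs n) (false, false)
  st.1 && st.2

-- ===== PORT B =====
def contains_quotes_alt (text : String) : Bool :=
  let cs := text.toList
  let pos := (PySem.List.enumerate cs).filterMap
    (fun p => if p.2 == '"' then some p.1 else none)
  match h : pos with
  | [] => false
  | f :: rest =>
      let n : Int := PySem.Str.len text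
      let half := PySem.Int.floordiv n 2
      decide (f < half) && decide (n - half ≤ (f :: rest).getLast (by simp))

-- ===== PRECONDITION & SPEC =====
def Spec_contains_quotes (text : String) (out : Bool) : Prop := out = contains_quotes_alt text
instance (text : String) (out : Bool) : Decidable (Spec_contains_quotes text out) := by unfold Spec_contains_quotes; infer_instance

-- ===== CLAIM =====
def Claim_equal_contains_quotes : Prop := ∀ (text : String), Dom_contains_quotes text → Spec_contains_quotes text (contains_quotes text)

-- ===== LEMMAS AND PROOFS =====

-- '"' as a one-char pattern occurs in s iff '"' is an element of s.
theorem isIn_quote_iff (s : List Char) : PySem.Chars.isIn ['"'] s = true ↔ '"' ∈ s := by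
  rw [PySem.Chars.isIn_iff_infix]
  exact List.singleton_infix_iff '"' s

theorem isIn_quote_eq_any (s : List Char) :
    PySem.Chars.isIn ['"'] s = s.any (fun c => c == '"') := by
  have h1 := isIn_quote_iff s
  have h2 : s.any (fun c => c == '"') = true ↔ '"' ∈ s := by simp
  cases hb : PySem.Chars.isIn ['"'] s <;> cases hc : s.any (fun c => c == '"') <;> simp_all

-- Loop invariant for A's fold over range(len//2).
theorem cq_loop (cs : List Char) (m : Nat) (hm : m ≤ cs.length) (a b : Bool) :
    ((List.range m).map (fun (k : Nat) => (k : Int))).foldl (cqStep cs (cs.length : Int)) (a, b) =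
      (a || (cs.take m).any (fun c => c == '"'),
       b || (cs.drop (cs.length - m)).any (fun c => c == '"')) := by
  induction m generalizing a b with
  | zero => simp
  | succ m ih =>
      have hm' : m ≤ cs.length := Nat.le_of_succ_le hm
      have hmlt : m < cs.length := hm
      rw [List.range_succ, List.map_append, List.foldl_append, ih hm']
      simp only [List.map_cons, List.map_nil, List.foldl_cons, List.foldl_nil, cqStep]
      have hj : ((cs.length : Int) - 1 - (m : Int)) = ((cs.length - 1 - m : Nat) : Int) := by
        omega
      have hjlt : cs.length - 1 - m < cs.length := by omega
      rw [hj]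
      simp only [PySem.List.pyGetD_natCast, List.getD_eq_getElem?_getD,
        List.getElem?_eq_getElem hmlt, List.getElem?_eq_getElem hjlt, Option.getD_some]
      have htake : cs.take (m + 1) = cs.take m ++ [cs[m]] := by
        rw [List.take_add_one, List.getElem?_eq_getElem hmlt]; rfl
      have hdrop : cs.drop (cs.length - (m + 1)) = cs[cs.length - 1 - m] :: cs.drop (cs.length - m) := by
        have h1 : cs.length - (m + 1) < cs.length := by omega
        rw [List.drop_eq_getElem_cons h1]
        have : cs.length - (m + 1) + 1 = cs.length - m := by omega
        rw [this]
        congr 1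
        congr 1
        omega
      rw [htake, hdrop]
      simp only [isIn_quote_eq_any, List.any_append, List.any_cons, List.any_nil]
      rw [Prod.mk.injEq]
      refine ⟨?_, ?_⟩ <;> split_ifs with h <;>
        (try simp_all [Bool.or_comm]) <;>
        (rw [beq_eq_false_iff_ne.mpr h]; simp)

-- The quote-position list of B: membership characterisation.
theorem mem_pos_iff (cs : List Char) (i : Int) :
    i ∈ (PySem.List.enumerate cs).filterMap
        (fun p => if p.2 == '"' then some p.1 else none) ↔
      ∃ (m : Nat) (hm : m < cs.length), i = (m : Int) ∧ cs[m] = '"' := by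
  simp only [List.mem_filterMap, PySem.List.mem_enumerate_iff]
  constructor
  · rintro ⟨p, ⟨m, hm, rfl⟩, hp⟩
    by_cases hq : cs[m] = '"'
    · exact ⟨m, hm, Eq.symm (by simpa [hq] using hp), hq⟩
    · simp [hq] at hp
  · rintro ⟨m, hm, rfl, hq⟩
    exact ⟨((m : Int), cs[m]), ⟨m, hm, by simp⟩, by simp [hq]⟩

-- The position list is strictly increasing.
theorem pos_pairwise (cs : List Char) :
    ((PySem.List.enumerate cs).filterMap
        (fun p => if p.2 == '"' then some p.1 else none)).Pairwise (· < ·) := by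
  have h := PySem.List.pairwise_lt_enumerate cs (s := 0)
  refine List.Pairwise.filterMap _ ?_ h
  intro p q hpq a ha b hb
  by_cases h1 : p.2 == '"' <;> by_cases h2 : q.2 == '"' <;> simp_all

-- Head of an increasingly sorted list is minimal, last is maximal.
theorem sorted_head_min {f : Int} {rest : List Int} (h : (f :: rest).Pairwise (· < ·))
    {x : Int} (hx : x ∈ f :: rest) : f ≤ x := by
  rcases List.mem_cons.mp hx with rfl | hx
  · exact le_refl x
  · exact le_of_lt ((List.pairwise_cons.mp h).1 x hx)

theorem sorted_last_max : ∀ (l : List Int) (hl : l ≠ []), l.Pairwise (· < ·) →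
    ∀ x ∈ l, x ≤ l.getLast hl := by
  intro l
  induction l with
  | nil => intro h; exact absurd rfl h
  | cons a t ih =>
      intro _ hp x hx
      rcases List.mem_cons.mp hx with rfl | hx
      · cases t with
        | nil => simp
        | cons b u =>
            have hb : x < b := (List.pairwise_cons.mp hp).1 b (by simp)
            have := ih (by simp) (List.pairwise_cons.mp hp).2 b (by simp)
            rw [List.getLast_cons (by simp)]
            omega
      · have ht : t ≠ [] := by intro h; simp [h] at hx
        rw [List.getLast_cons ht]
        exact ih ht (List.pairwise_cons.mp hp).2 x hx

-- any on a take, via indices.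
theorem any_take_iff (cs : List Char) (h : Nat) :
    (cs.take h).any (fun c => c == '"') = true ↔
      ∃ (m : Nat) (hm : m < cs.length), m < h ∧ cs[m] = '"' := by
  rw [List.any_eq_true]
  constructor
  · rintro ⟨x, hx, hq⟩
    obtain ⟨m, hm, hget⟩ := List.getElem_of_mem hx
    have hm1 : m < h := lt_of_lt_of_le hm (by simp [List.length_take])
    have hm2 : m < cs.length := lt_of_lt_of_le hm (by simp [List.length_take])
    refine ⟨m, hm2, hm1, ?_⟩
    have heq : (cs.take h)[m]? = cs[m]? := List.getElem?_take_of_lt hm1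
    rw [List.getElem?_eq_getElem hm, List.getElem?_eq_getElem hm2] at heq
    have hxq : x = '"' := by simpa using hq
    rw [hget, hxq] at heq
    exact (Option.some_inj.mp heq).symm
  · rintro ⟨m, hm, hmh, hq⟩
    refine ⟨'"', ?_, by simp⟩
    have heq : (cs.take h)[m]? = cs[m]? := List.getElem?_take_of_lt hmh
    rw [List.getElem?_eq_getElem hm, hq] at heq
    exact List.mem_of_getElem? heq

-- any on a drop, via indices.
theorem any_drop_iff (cs : List Char) (k : Nat) :
    (cs.drop k).any (fun c => c == '"') = true ↔
      ∃ (m : Nat) (hm : m < cs.length), k ≤ m ∧ cs[m] = '"' := by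
  rw [List.any_eq_true]
  constructor
  · rintro ⟨x, hx, hq⟩
    obtain ⟨m, hm, hget⟩ := List.getElem_of_mem hx
    have hml : k + m < cs.length := by
      have := hm; simp [List.length_drop] at this; omega
    refine ⟨k + m, hml, by omega, ?_⟩
    have heq : (cs.drop k)[m]? = cs[k + m]? := List.getElem?_drop ..
    rw [List.getElem?_eq_getElem hm, List.getElem?_eq_getElem hml] at heq
    have hxq : x = '"' := by simpa using hq
    rw [hget, hxq] at heq
    exact (Option.some_inj.mp heq).symm
  · rintro ⟨m, hm, hkm, hq⟩
    refine ⟨'"', ?_, by simp⟩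
    have hkk : k + (m - k) = m := by omega
    have heq : (cs.drop k)[m - k]? = cs[k + (m - k)]? := List.getElem?_drop ..
    rw [hkk, List.getElem?_eq_getElem hm, hq] at heq
    exact List.mem_of_getElem? heq

-- ===== VERDICT =====
theorem contains_quotes_spec : Claim_equal_contains_quotes := by
  intro text _
  unfold Spec_contains_quotes contains_quotes contains_quotes_alt
  set cs := text.toList with hcs
  have hlen : PySem.Str.len text = (cs.length : Int) := by simp [PySem.Str.len_eq, hcs]
  have hfd : PySem.Int.floordiv (cs.length : Int) 2 = ((cs.length / 2 : Nat) : Int) := by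
    exact_mod_cast PySem.Int.floordiv_natCast cs.length 2
  have hrange : PySem.List.pyRange 0 ((cs.length / 2 : Nat) : Int) 1 =
      (List.range (cs.length / 2)).map (fun (k : Nat) => (k : Int)) :=
    PySem.List.pyRange_zero_natCast (cs.length / 2)
  have hm : cs.length / 2 ≤ cs.length := Nat.div_le_self _ _
  simp only [hlen, hfd, hrange]
  rw [cq_loop cs (cs.length / 2) hm false false]
  simp only [Bool.false_or]
  cases hp : (PySem.List.enumerate cs).filterMap
      (fun p => if p.2 == '"' then some p.1 else none) with
  | nil =>
      have hnone : ∀ (m : Nat) (hm' : m < cs.length), cs[m] ≠ '"' := by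
        intro m hm' hq
        have hmem : ((m : Int)) ∈ (PySem.List.enumerate cs).filterMap
            (fun p => if p.2 == '"' then some p.1 else none) :=
          (mem_pos_iff cs m).mpr ⟨m, hm', rfl, hq⟩
        rw [hp] at hmem
        exact absurd hmem (List.not_mem_nil)
      have h1 : (cs.take (cs.length / 2)).any (fun c => c == '"') = false := by
        rw [Bool.eq_false_iff]
        intro htrue
        obtain ⟨m, hm', _, hq⟩ := (any_take_iff cs (cs.length / 2)).mp htrue
        exact hnone m hm' hq
      rw [h1]
      simp
  | cons f rest =>
      have hpw : (f :: rest).Pairwise (· < ·) := by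
        have h := pos_pairwise cs; rw [hp] at h; exact h
      obtain ⟨mf, hmf, hfe, hqf⟩ := (mem_pos_iff cs f).mp (by rw [hp]; simp)
      set l := (f :: rest).getLast (by simp) with hl
      obtain ⟨ml, hml, hle, hql⟩ := (mem_pos_iff cs l).mp
        (by rw [hp]; exact List.getLast_mem _)
      have hsub : (cs.length : Int) - ((cs.length / 2 : Nat) : Int) =
          ((cs.length - cs.length / 2 : Nat) : Int) := by omega
      rw [hsub]
      congr 1
      · rw [Bool.eq_iff_iff, any_take_iff, decide_eq_true_eq]
        constructor
        · rintro ⟨m, hm', hmh, hq⟩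
          have hmem : ((m : Int)) ∈ (f :: rest) := by
            rw [← hp]; exact (mem_pos_iff cs m).mpr ⟨m, hm', rfl, hq⟩
          have := sorted_head_min hpw hmem
          omega
        · intro hflt
          exact ⟨mf, hmf, by omega, hqf⟩
      · rw [Bool.eq_iff_iff, any_drop_iff, decide_eq_true_eq]
        constructor
        · rintro ⟨m, hm', hmk, hq⟩
          have hmem : ((m : Int)) ∈ (f :: rest) := by
            rw [← hp]; exact (mem_pos_iff cs m).mpr ⟨m, hm', rfl, hq⟩
          have := sorted_last_max (f :: rest) (by simp) hpw _ hmem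
          omega
        · intro hge
          exact ⟨ml, hml, by omega, hql⟩
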